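-- pv_equiv track=rewrite | github.com/gkmanev/energyMapBackend | entsoe_api/management/commands/fetch_flows.py | _expand_iso_pairs_to_eic_pairs
-- ===== SOURCE A (Python) =====
-- from typing import Dict, List, Tuple, Union, Iterable
--
-- def _iter_eics(val: Union[str, Iterable[str]]) -> Iterable[str]:
--     """Yield normalized EICs from str or iterable[str]."""
--     if isinstance(val, (list, tuple, set)):
--         for item in val:
--             if item:
--                 s = str(item).strip()
--                 if s:
--                     yield s
--     else:
--         if val:
--             s = str(val).strip()
--             if s:
--                 yield s
--
-- def _dedupe_pairs(pairs: List[Tuple[str, str]]) -> List[Tuple[str, str]]: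
--     """Remove exact duplicate EIC pairs while preserving order."""
--     seen = set()
--     out = []
--     for p in pairs:
--         if p not in seen:
--             seen.add(p)
--             out.append(p)
--     return out
--
-- def _expand_iso_pairs_to_eic_pairs(
--     pair_iso_edges: List[Tuple[str, str]],
--     country_to_eics: Dict[str, Union[str, List[str]]],
-- ) -> List[Tuple[str, str]]:
--     eic_pairs: List[Tuple[str, str]] = []
--     for out_iso, in_iso in pair_iso_edges:
--         out_eics = list(_iter_eics(country_to_eics[out_iso]))
--         in_eics = list(_iter_eics(country_to_eics[in_iso]))
--         for o in out_eics:
--             for i in in_eics: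
--                 eic_pairs.append((o, i))
--     return _dedupe_pairs(eic_pairs)
-- ===== SOURCE B (Python) =====
-- def _expand_iso_pairs_to_eic_pairs(pair_iso_edges, country_to_eics):
--     def norm(val):
--         vals = val if isinstance(val, (list, tuple, set)) else [val]
--         return [s for s in (str(x).strip() for x in vals if x) if s]
--
--     pairs = [(o, i)
--              for out_iso, in_iso in pair_iso_edges
--              for o in norm(country_to_eics[out_iso])
--              for i in norm(country_to_eics[in_iso])]
--     # first-occurrence index of each distinct pair: build back-to-front so
--     # earlier indices overwrite later ones, then order the keys by that index
--     first = {p: idx for idx, p in reversed(list(enumerate(pairs)))}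
--     return sorted(first, key=first.get)
-- ===== Notes on version B (the rewrite author's own statement) =====
-- stated objective: alternative
-- what changed: B builds the flat pair list with a comprehension and recovers the first-occurrence order arithmetically instead of with a seen-set accumulator: a dict comprehension over the reversed enumeration maps each pair to its first index, and the result is the dict's keys sorted by that index.
import Mathlib
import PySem

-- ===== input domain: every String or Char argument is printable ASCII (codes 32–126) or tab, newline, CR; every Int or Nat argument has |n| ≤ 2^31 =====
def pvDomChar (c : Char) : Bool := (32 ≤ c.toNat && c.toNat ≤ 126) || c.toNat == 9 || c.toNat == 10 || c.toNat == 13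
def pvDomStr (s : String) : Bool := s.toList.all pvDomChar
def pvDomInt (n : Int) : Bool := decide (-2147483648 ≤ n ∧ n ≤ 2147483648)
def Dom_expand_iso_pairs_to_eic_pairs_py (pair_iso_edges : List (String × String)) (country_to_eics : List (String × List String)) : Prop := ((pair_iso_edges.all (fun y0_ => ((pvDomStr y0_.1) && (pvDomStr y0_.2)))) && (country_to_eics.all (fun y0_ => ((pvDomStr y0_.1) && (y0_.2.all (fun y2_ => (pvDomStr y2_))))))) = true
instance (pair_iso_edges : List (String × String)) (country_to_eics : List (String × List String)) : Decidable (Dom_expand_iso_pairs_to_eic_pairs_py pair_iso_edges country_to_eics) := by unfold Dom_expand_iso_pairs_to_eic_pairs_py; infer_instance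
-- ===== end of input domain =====

-- B replaces A's seen-set/out-list dedupe pass by an index computation: it maps each pair to its
-- first index via a dict built over the reversed enumeration and sorts the keys by that index
-- (objective: alternative; return values proved equal on Pre_).

-- ===== PORT A =====
-- _iter_eics on a list value (the Lean value type is List String, so the isinstance branch is the list one)
def pvIterEicsA : List String → List String
  | [] => []
  | x :: xs =>
    if x ≠ "" then
      let s := PySem.Str.strip x
      if s ≠ "" then s :: pvIterEicsA xs else pvIterEicsA xs
    else pvIterEicsA xs

-- _dedupe_pairs: seen-set + out-list fold
def pvDedupeStep (st : PySem.Set (String × String) × List (String × String)) (p : String × String) :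
    PySem.Set (String × String) × List (String × String) :=
  if p ∈ st.1 then st else (PySem.Set.add st.1 p, st.2 ++ [p])

def pvDedupePairs (pairs : List (String × String)) : List (String × String) :=
  (pairs.foldl pvDedupeStep (PySem.Set.empty, [])).2

-- country_to_eics[iso]: dict lookup; KeyError (missing key) is excluded by Pre_, the port defaults to []
def expand_iso_pairs_to_eic_pairs_py (pair_iso_edges : List (String × String)) (country_to_eics : List (String × List String)) : List (String × String) :=
  let eic_pairs :=
    pair_iso_edges.foldl (fun acc e =>
      let out_eics := pvIterEicsA ((country_to_eics.lookup e.1).getD [])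
      let in_eics := pvIterEicsA ((country_to_eics.lookup e.2).getD [])
      out_eics.foldl (fun acc2 o => in_eics.foldl (fun acc3 i => acc3 ++ [(o, i)]) acc2) acc) []
  pvDedupePairs eic_pairs

-- ===== PORT B =====
-- norm(val): the comprehension [s for s in (str(x).strip() for x in vals if x) if s]
def pvNormB (vals : List String) : List String :=
  ((vals.filter (fun x => x ≠ "")).map PySem.Str.strip).filter (fun s => s ≠ "")

-- the pairs comprehension
def pvPairsB (pair_iso_edges : List (String × String)) (country_to_eics : List (String × List String)) : List (String × String) :=
  pair_iso_edges.flatMap (fun e =>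
    (pvNormB ((country_to_eics.lookup e.1).getD [])).flatMap (fun o =>
      (pvNormB ((country_to_eics.lookup e.2).getD [])).map (fun i => (o, i))))

def expand_iso_pairs_to_eic_pairs_py_alt (pair_iso_edges : List (String × String)) (country_to_eics : List (String × List String)) : List (String × String) :=
  let pairs := pvPairsB pair_iso_edges country_to_eics
  -- first = {p: idx for idx, p in reversed(list(enumerate(pairs)))}
  let first : PySem.Dict (String × String) Int :=
    ((PySem.List.enumerate pairs).reverse).foldl (fun d q => d.insert q.2 q.1) PySem.Dict.empty
  -- sorted(first, key=first.get)  (first.get never returns None on a key of first)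
  PySem.List.sorted first.keys (fun p => first.getD p 0)

-- ===== PRECONDITION & SPEC =====
-- Pre_ excludes exactly the inputs where Python A raises KeyError: an edge whose ISO is not a key of the dict.
def Pre_expand_iso_pairs_to_eic_pairs_py (pair_iso_edges : List (String × String)) (country_to_eics : List (String × List String)) : Prop :=
  ∀ e ∈ pair_iso_edges, e.1 ∈ country_to_eics.map Prod.fst ∧ e.2 ∈ country_to_eics.map Prod.fst

instance (pair_iso_edges : List (String × String)) (country_to_eics : List (String × List String)) : Decidable (Pre_expand_iso_pairs_to_eic_pairs_py pair_iso_edges country_to_eics) := by unfold Pre_expand_iso_pairs_to_eic_pairs_py; infer_instance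

def pvWitness_expand_iso_pairs_to_eic_pairs_py : (List (String × String)) × (List (String × List String)) :=
  ([("BG", "GR"), ("GR", "BG"), ("BG", "GR")], [("BG", ["10YCA-BULGARIA-R", " 10YCA-BULGARIA-R "]), ("GR", ["10YGR-HTSO-----Y", ""])])

def Spec_expand_iso_pairs_to_eic_pairs_py (pair_iso_edges : List (String × String)) (country_to_eics : List (String × List String)) (out : List (String × String)) : Prop := out = expand_iso_pairs_to_eic_pairs_py_alt pair_iso_edges country_to_eics
instance (pair_iso_edges : List (String × String)) (country_to_eics : List (String × List String)) (out : List (String × String)) : Decidable (Spec_expand_iso_pairs_to_eic_pairs_py pair_iso_edges country_to_eics out) := by unfold Spec_expand_iso_pairs_to_eic_pairs_py; infer_instance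

-- ===== CLAIM (what is proved, stated in full; the proofs are below) =====
def Claim_equal_expand_iso_pairs_to_eic_pairs_py : Prop := ∀ (pair_iso_edges : List (String × String)) (country_to_eics : List (String × List String)), Dom_expand_iso_pairs_to_eic_pairs_py pair_iso_edges country_to_eics → Pre_expand_iso_pairs_to_eic_pairs_py pair_iso_edges country_to_eics → Spec_expand_iso_pairs_to_eic_pairs_py pair_iso_edges country_to_eics (expand_iso_pairs_to_eic_pairs_py pair_iso_edges country_to_eics)

-- ===== LEMMAS AND PROOFS =====

-- A's generator equals B's comprehension
theorem pvIterEicsA_eq_normB (l : List String) : pvIterEicsA l = pvNormB l := by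
  induction l with
  | nil => rfl
  | cons x xs ih =>
    simp only [pvIterEicsA, pvNormB, List.filter_cons] at *
    by_cases hx : x = ""
    · simp [hx, ih]
    · simp only [hx, ne_eq, not_false_eq_true, if_true, decide_not, decide_eq_true_eq]
      by_cases hs : PySem.Str.strip x = "" <;> simp [hs, ih]

-- A's nested append loops over one edge produce acc ++ (cross product as a flat list)
theorem pv_inner_append (in_e : List String) (o : String) :
    ∀ (a : List (String × String)),
      in_e.foldl (fun acc3 i => acc3 ++ [(o, i)]) a = a ++ in_e.map (fun i => (o, i)) := by
  induction in_e with
  | nil => intro a; simp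
  | cons i is ih => intro a; simp [List.foldl_cons, ih]

theorem pv_cross_append (out_e in_e : List String) :
    ∀ (a : List (String × String)),
      out_e.foldl (fun acc2 o => in_e.foldl (fun acc3 i => acc3 ++ [(o, i)]) acc2) a
        = a ++ out_e.flatMap (fun o => in_e.map (fun i => (o, i))) := by
  induction out_e with
  | nil => intro a; simp
  | cons o os ih =>
    intro a
    rw [List.foldl_cons, pv_inner_append, ih, List.flatMap_cons, List.append_assoc]

-- A's edge fold builds exactly B's pairs comprehension
theorem pv_buildA_eq (c2e : List (String × List String)) (edges : List (String × String)) :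
    ∀ (acc : List (String × String)),
      edges.foldl (fun acc e =>
        let out_eics := pvIterEicsA ((c2e.lookup e.1).getD [])
        let in_eics := pvIterEicsA ((c2e.lookup e.2).getD [])
        out_eics.foldl (fun acc2 o => in_eics.foldl (fun acc3 i => acc3 ++ [(o, i)]) acc2) acc) acc
      = acc ++ pvPairsB edges c2e := by
  induction edges with
  | nil => intro acc; simp [pvPairsB]
  | cons e es ih =>
    intro acc
    rw [List.foldl_cons]
    show es.foldl _ ((pvIterEicsA ((c2e.lookup e.1).getD [])).foldl _ acc) = _
    rw [ih, pv_cross_append, pvIterEicsA_eq_normB, pvIterEicsA_eq_normB]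
    simp [pvPairsB]

-- the first-occurrence dedupe, recursively
def pyDedup (s : List (String × String)) : List (String × String) → List (String × String)
  | [] => []
  | x :: xs => if x ∈ s then pyDedup s xs else x :: pyDedup (s ++ [x]) xs

theorem pv_dedupe_fold (L : List (String × String)) :
    ∀ (s : List (String × String)),
      L.foldl pvDedupeStep (s, s) = (s ++ pyDedup s L, s ++ pyDedup s L) := by
  induction L with
  | nil => intro s; simp [pyDedup]
  | cons x xs ih =>
    intro s
    rw [List.foldl_cons]
    by_cases hx : x ∈ s
    · simp only [pvDedupeStep, hx, if_true, ih, pyDedup]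
    · simp only [pvDedupeStep, hx, if_false, PySem.Set.add_of_not_mem hx, pyDedup]
      rw [ih (s ++ [x])]
      simp

theorem pv_A_eq_pyDedup (L : List (String × String)) : pvDedupePairs L = pyDedup [] L := by
  unfold pvDedupePairs
  have h := pv_dedupe_fold L []
  simp only [PySem.Set.empty] at *
  rw [h]
  simp

theorem pv_mem_pyDedup (L : List (String × String)) :
    ∀ (s : List (String × String)) (x : String × String),
      x ∈ pyDedup s L ↔ x ∉ s ∧ x ∈ L := by
  induction L with
  | nil => intro s x; simp [pyDedup]
  | cons y ys ih =>
    intro s x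
    by_cases hy : y ∈ s
    · simp only [pyDedup, if_pos hy, ih, List.mem_cons]
      constructor
      · rintro ⟨h1, h2⟩; exact ⟨h1, Or.inr h2⟩
      · rintro ⟨h1, h2 | h2⟩
        · exact absurd (h2 ▸ hy) h1
        · exact ⟨h1, h2⟩
    · simp only [pyDedup, if_neg hy, List.mem_cons, ih, List.mem_append]
      constructor
      · rintro (rfl | ⟨h1, h2⟩)
        · exact ⟨hy, Or.inl rfl⟩
        · exact ⟨fun hs => h1 (Or.inl hs), Or.inr h2⟩
      · rintro ⟨h1, rfl | h2⟩
        · exact Or.inl rfl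
        · by_cases hxy : x = y
          · exact Or.inl hxy
          · refine Or.inr ⟨fun h => ?_, h2⟩
            rcases h with h | h | h
            · exact h1 h
            · exact hxy h
            · exact List.not_mem_nil h

-- the dedupe is strictly increasing in first-occurrence index
theorem pv_pyDedup_pairwise (L : List (String × String)) :
    ∀ (s : List (String × String)),
      (pyDedup s L).Pairwise (fun a b => L.idxOf a < L.idxOf b) := by
  induction L with
  | nil => intro s; simp [pyDedup]
  | cons y ys ih =>
    intro s
    by_cases hy : y ∈ s
    · rw [pyDedup, if_pos hy]
      refine (ih s).imp_of_mem (fun {a b} ha hb hab => ?_)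
      have hna : a ≠ y := fun h => ((pv_mem_pyDedup ys s a).1 ha).1 (h ▸ hy)
      have hnb : b ≠ y := fun h => ((pv_mem_pyDedup ys s b).1 hb).1 (h ▸ hy)
      rw [List.idxOf_cons_ne _ (Ne.symm hna), List.idxOf_cons_ne _ (Ne.symm hnb)]
      omega
    · rw [pyDedup, if_neg hy]
      refine List.Pairwise.cons ?_ ?_
      · intro b hb
        have hnb : b ≠ y := fun h =>
          ((pv_mem_pyDedup ys (s ++ [y]) b).1 hb).1 (by simp [h])
        rw [List.idxOf_cons_self, List.idxOf_cons_ne _ (Ne.symm hnb)]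
        omega
      · refine (ih (s ++ [y])).imp_of_mem (fun {a b} ha hb hab => ?_)
        have hna : a ≠ y := fun h =>
          ((pv_mem_pyDedup ys (s ++ [y]) a).1 ha).1 (by simp [h])
        have hnb : b ≠ y := fun h =>
          ((pv_mem_pyDedup ys (s ++ [y]) b).1 hb).1 (by simp [h])
        rw [List.idxOf_cons_ne _ (Ne.symm hna), List.idxOf_cons_ne _ (Ne.symm hnb)]
        omega

theorem pv_pyDedup_nodup (L : List (String × String)) : (pyDedup [] L).Nodup := by
  refine (pv_pyDedup_pairwise L []).imp_of_mem (fun {a b} _ _ hab => ?_)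
  intro h; subst h; omega

-- the dict fold: last insert wins
theorem pv_get_foldl_insert (E : List (Int × (String × String))) :
    ∀ (d : PySem.Dict (String × String) Int) (x : String × String),
      ((E.foldl (fun d q => d.insert q.2 q.1) d).get? x)
        = ((E.reverse.find? (fun q => q.2 == x)).map Prod.fst).or (d.get? x) := by
  induction E with
  | nil => intro d x; simp
  | cons e E ih =>
    intro d x
    rw [List.foldl_cons, ih, List.reverse_cons, List.find?_append]
    cases hf : E.reverse.find? (fun q => q.2 == x) with
    | some p => simp
    | none =>
      simp only [Option.none_or, Option.map_none, List.find?_singleton]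
      rw [PySem.Dict.get?_insert]
      by_cases hx : e.2 = x
      · simp [hx]
      · have h1 : (e.2 == x) = false := by simpa using hx
        have h2 : ¬ x = e.2 := fun h => hx h.symm
        simp [h1, h2]

-- find? over the enumeration returns the first index
theorem pv_find_enumerate (L : List (String × String)) :
    ∀ (s : Int) (x : String × String), x ∈ L →
      (PySem.List.enumerate L s).find? (fun q => q.2 == x)
        = some (s + (L.idxOf x : Int), x) := by
  induction L with
  | nil => intro s x hx; simp at hx
  | cons y ys ih =>
    intro s x hx
    rw [PySem.List.enumerate_cons, List.find?_cons]
    by_cases hxy : y = x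
    · subst hxy
      simp [List.idxOf_cons_self]
    · have hb : (y == x) = false := by simpa using hxy
      have hx' : x ∈ ys := by
        rcases List.mem_cons.1 hx with h | h
        · exact absurd h.symm hxy
        · exact h
      simp only [hb]
      rw [ih (s + 1) x hx', List.idxOf_cons_ne _ hxy]
      congr 2
      push_cast
      ring

-- the dict built by B over the reversed enumeration of L
def pvFirst (L : List (String × String)) : PySem.Dict (String × String) Int :=
  ((PySem.List.enumerate L).reverse).foldl (fun d q => d.insert q.2 q.1) PySem.Dict.empty

theorem pv_getD_eq (d : PySem.Dict (String × String) Int) (k : String × String) :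
    d.getD k 0 = (d.get? k).getD 0 := by
  simp [PySem.Dict.getD, PySem.Dict.get?]

-- the value stored for x is x's first index in L
theorem pv_first_get (L : List (String × String)) (x : String × String) (hx : x ∈ L) :
    (pvFirst L).get? x = some ((L.idxOf x : Int)) := by
  unfold pvFirst
  rw [pv_get_foldl_insert, List.reverse_reverse, pv_find_enumerate L 0 x hx]
  simp

-- the dict's keys are the distinct pairs
theorem pv_first_keys (L : List (String × String)) :
    (pvFirst L).keys = PySem.Set.ofList L.reverse := by
  unfold pvFirst
  have h := PySem.Dict.keys_foldl_insert_key ((PySem.List.enumerate L).reverse)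
      (fun q => q.2) (fun _ q => q.1) (PySem.Dict.empty : PySem.Dict (String × String) Int)
  simp only at h
  rw [h]
  have hk : (PySem.Dict.empty : PySem.Dict (String × String) Int).keys = [] := rfl
  rw [hk, PySem.Set.update_nil_left, List.map_reverse, PySem.List.map_snd_enumerate]

-- B's sorted keys equal the recursive dedupe
theorem pv_B_eq_pyDedup (L : List (String × String)) :
    PySem.List.sorted (pvFirst L).keys (fun p => (pvFirst L).getD p 0) = pyDedup [] L := by
  apply PySem.List.sorted_eq_of_perm_of_pairwise_lt
  · -- permutation: both nodup with the same members
    rw [pv_first_keys]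
    refine (List.perm_ext_iff_of_nodup (pv_pyDedup_nodup L) (PySem.Set.nodup_ofList _)).2 ?_
    intro a
    rw [PySem.Set.mem_ofList, List.mem_reverse, pv_mem_pyDedup]
    simp
  · -- strictly increasing key on pyDedup [] L
    refine (pv_pyDedup_pairwise L []).imp_of_mem (fun {a b} ha hb hab => ?_)
    have hma : a ∈ L := ((pv_mem_pyDedup L [] a).1 ha).2
    have hmb : b ∈ L := ((pv_mem_pyDedup L [] b).1 hb).2
    rw [pv_getD_eq, pv_getD_eq, pv_first_get L a hma, pv_first_get L b hmb]
    simpa using hab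

-- ===== VERDICT (by name: the statement is the Claim_ definition above) =====
theorem expand_iso_pairs_to_eic_pairs_py_spec : Claim_equal_expand_iso_pairs_to_eic_pairs_py := by
  intro edges c2e _ _
  unfold Spec_expand_iso_pairs_to_eic_pairs_py
  unfold expand_iso_pairs_to_eic_pairs_py expand_iso_pairs_to_eic_pairs_py_alt
  simp only
  rw [pv_buildA_eq c2e edges [], List.nil_append, pv_A_eq_pyDedup]
  exact (pv_B_eq_pyDedup (pvPairsB edges c2e)).symm
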